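-- pv_equiv track=rewrite | github.com/xiezhq/ISEScan | tools.py | getWindowKey4abundance
-- ===== SOURCE A (Python) =====
-- import itertools
--
-- def ncopyByCutoff(ilist, cutoff=0):
-- 	ilist.sort()
-- 	gs = itertools.groupby(ilist)
-- 	windows = {}
-- 	kgs = []
-- 	for k,g in gs:
-- 		# requirement: k >= cutoff
-- 		if k <= cutoff:
-- 			start = 1
-- 		else:
-- 			start = k - cutoff
-- 		end = k + cutoff
-- 		windows[k] = (start, end)
-- 		kgs.append([k,list(g)])
-- 	# n4windows: {k:n4window, ...}
-- 	n4windows = {}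
-- 	for k4win,window in windows.items():
-- 		n4windows[k4win] = 0
-- 		for k,g in kgs:
-- 			if window[0] <= k <= window[1]:
-- 				n4windows[k4win] += len(g)
-- 	return n4windows
--
-- def getWindowKey4abundance(ilist):
-- 	cutoffs = set()
-- 	ilist.sort()
-- 	# get all possible cutoff values (distance between two items) between any two items in ilist.
-- 	for pair in itertools.combinations(ilist, 2):
-- 		cutoffs.add(pair[1]-pair[0])
-- 	# n4windows4cutoffs: {k:n4win, ...}
-- 	# n4win: is the total number of items in the window centered at k under all possible cutoffs.
-- 	n4windows4cutoffs = {}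
-- 	for cutoff in cutoffs:
-- 		# n4windows: {k:n, ...}
-- 		# k: item in ilist
-- 		# n: number of items in the window centered at k under a cutoff
-- 		n4windows = ncopyByCutoff(ilist, cutoff)
-- 		for k,n in n4windows.items():
-- 			if k not in n4windows4cutoffs.keys():
-- 				n4windows4cutoffs[k] = 0
-- 			n4windows4cutoffs[k] += n
-- 	return n4windows4cutoffs
-- ===== SOURCE B (Python) =====
-- import itertools
--
--
-- def _bisect_left(a, x):
-- 	# stdlib bisect.bisect_left (not importable here: A only imports itertools)
-- 	lo, hi = 0, len(a)
-- 	while lo < hi: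
-- 		mid = (lo + hi) // 2
-- 		if a[mid] < x:
-- 			lo = mid + 1
-- 		else:
-- 			hi = mid
-- 	return lo
--
--
-- def _bisect_right(a, x):
-- 	lo, hi = 0, len(a)
-- 	while lo < hi:
-- 		mid = (lo + hi) // 2
-- 		if a[mid] <= x:
-- 			lo = mid + 1
-- 		else:
-- 			hi = mid
-- 	return lo
--
--
-- def getWindowKey4abundance(ilist):
-- 	ilist.sort()
-- 	# run-length encode the sorted list once: distinct values + multiplicities
-- 	vals = []
-- 	counts = []
-- 	for k, g in itertools.groupby(ilist):
-- 		vals.append(k)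
-- 		counts.append(len(list(g)))
-- 	# prefix sums: pre[i] = number of items among the first i distinct values
-- 	pre = [0]
-- 	for c in counts:
-- 		pre.append(pre[-1] + c)
-- 	# all pairwise distances
-- 	cutoffs = {b - a for a, b in itertools.combinations(ilist, 2)}
-- 	out = {}
-- 	for cutoff in cutoffs:
-- 		for k in vals:
-- 			start = 1 if k <= cutoff else k - cutoff
-- 			end = k + cutoff
-- 			lo = _bisect_left(vals, start)
-- 			hi = _bisect_right(vals, end)
-- 			out[k] = out.get(k, 0) + max(pre[hi] - pre[lo], 0)
-- 	return out
-- ===== Notes on version B (the rewrite author's own statement) =====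
-- stated objective: faster
-- what changed: A re-sorts and re-groups the list for every cutoff and counts each window by rescanning all distinct values; B run-length-encodes the sorted list once, builds a prefix-sum array, and answers each window count with two hand-written binary searches over the distinct values.
import Mathlib
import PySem

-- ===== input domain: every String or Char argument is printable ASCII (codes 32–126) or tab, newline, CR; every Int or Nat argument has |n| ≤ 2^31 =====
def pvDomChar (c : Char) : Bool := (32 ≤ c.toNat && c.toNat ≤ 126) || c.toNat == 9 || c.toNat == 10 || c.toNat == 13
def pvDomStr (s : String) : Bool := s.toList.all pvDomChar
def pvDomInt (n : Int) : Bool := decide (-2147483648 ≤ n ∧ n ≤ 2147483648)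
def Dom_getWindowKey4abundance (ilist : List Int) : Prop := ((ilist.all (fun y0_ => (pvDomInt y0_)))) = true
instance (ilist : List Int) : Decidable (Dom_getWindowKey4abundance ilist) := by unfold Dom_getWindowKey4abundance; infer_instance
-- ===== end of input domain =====

-- B replaces A's per-cutoff re-sort/re-group and O(D^2) rescan of all distinct values by a single
-- run-length encoding + prefix sums, answering each window count with two binary searches (faster).
-- Both Pythons sort the argument list in place; the equivalence proved here is about the return value.

-- ===== PORT A =====
-- itertools.groupby over a list of ints: consecutive runs as (key, group)
def pyGroupby : List Int → List (Int × List Int)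
  | [] => []
  | x :: t =>
    match pyGroupby t with
    | [] => [(x, [x])]
    | (k, g) :: rest => if x = k then (x, x :: g) :: rest else (x, [x]) :: (k, g) :: rest

def ncopyByCutoff (ilist : List Int) (cutoff : Int) : PySem.Dict Int Int :=
  let s := PySem.List.sorted ilist (fun x => x) false
  let gs := pyGroupby s
  -- one loop filling the windows dict and the kgs list
  let wk := gs.foldl (fun (st : PySem.Dict Int (Int × Int) × List (Int × List Int)) kg =>
      (st.1.insert kg.1 (if kg.1 ≤ cutoff then (1 : Int) else kg.1 - cutoff, kg.1 + cutoff),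
       st.2 ++ [kg])) (PySem.Dict.empty, [])
  let windows := wk.1
  let kgs := wk.2
  windows.items.foldl (fun n4 kw =>
      kgs.foldl (fun n4 kg =>
        if kw.2.1 ≤ kg.1 ∧ kg.1 ≤ kw.2.2 then n4.insert kw.1 (n4.getD kw.1 0 + (kg.2.length : Int))
        else n4) (n4.insert kw.1 0))
    PySem.Dict.empty

def getWindowKey4abundance (ilist : List Int) : List (Int × Int) :=
  let s := PySem.List.sorted ilist (fun x => x) false
  let cutoffs : PySem.Set Int := (PySem.List.combinations s 2).foldl
      (fun cs pair => PySem.Set.add cs (PySem.List.pyGetD pair 1 0 - PySem.List.pyGetD pair 0 0))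
      PySem.Set.empty
  let res := cutoffs.foldl (fun acc cutoff =>
      (ncopyByCutoff ilist cutoff).items.foldl (fun acc kn =>
        let acc1 := if acc.contains kn.1 then acc else acc.insert kn.1 0
        acc1.insert kn.1 (acc1.getD kn.1 0 + kn.2)) acc)
    PySem.Dict.empty
  res.items

-- ===== PORT B =====
def getWindowKey4abundance_alt (ilist : List Int) : List (Int × Int) :=
  let s := PySem.List.sorted ilist (fun x => x) false
  -- run-length encode the sorted list once: distinct values + multiplicities
  let vc := (pyGroupby s).foldl (fun (st : List Int × List Int) kg =>
      (st.1 ++ [kg.1], st.2 ++ [(kg.2.length : Int)])) ([], [])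
  let vals := vc.1
  let counts := vc.2
  -- prefix sums: pre[i] = number of items among the first i distinct values
  let pre := counts.foldl (fun p c => p ++ [PySem.List.pyGetD p (-1) 0 + c]) [0]
  let cutoffs : PySem.Set Int := (PySem.List.combinations s 2).foldl
      (fun cs pair => PySem.Set.add cs (PySem.List.pyGetD pair 1 0 - PySem.List.pyGetD pair 0 0))
      PySem.Set.empty
  let res := cutoffs.foldl (fun acc cutoff =>
      vals.foldl (fun acc k =>
        let start := if k ≤ cutoff then (1 : Int) else k - cutoff
        let lo := PySem.List.bisectLeft vals start
        let hi := PySem.List.bisectRight vals (k + cutoff)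
        acc.insert k (acc.getD k 0 +
          max (PySem.List.pyGetD pre (hi : Int) 0 - PySem.List.pyGetD pre (lo : Int) 0) 0)) acc)
    PySem.Dict.empty
  res.items

-- ===== PRECONDITION & SPEC =====
def Spec_getWindowKey4abundance (ilist : List Int) (out : List (Int × Int)) : Prop := out = getWindowKey4abundance_alt ilist
instance (ilist : List Int) (out : List (Int × Int)) : Decidable (Spec_getWindowKey4abundance ilist out) := by unfold Spec_getWindowKey4abundance; infer_instance

-- ===== CLAIM (what is proved, stated in full; the proofs are below) =====
def Claim_equal_getWindowKey4abundance : Prop := ∀ (ilist : List Int), Dom_getWindowKey4abundance ilist → Spec_getWindowKey4abundance ilist (getWindowKey4abundance ilist)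

-- ===== LEMMAS AND PROOFS =====

-- proof-side abbreviations
def pvS (ilist : List Int) : List Int := PySem.List.sorted ilist (fun x => x) false
def pvGs (ilist : List Int) : List (Int × List Int) := pyGroupby (pvS ilist)
def pvVals (ilist : List Int) : List Int := (pvGs ilist).map (·.1)
def pvCounts (ilist : List Int) : List Int := (pvGs ilist).map (fun kg => (kg.2.length : Int))
def pvPsum (cs : List Int) (m : Nat) : Int := ∑ i ∈ Finset.range m, cs.getD i 0
def pvWin (c k : Int) : Int × Int := (if k ≤ c then (1 : Int) else k - c, k + c)
def pvCutoffs (ilist : List Int) : PySem.Set Int :=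
  (PySem.List.combinations (pvS ilist) 2).foldl
    (fun cs pair => PySem.Set.add cs (PySem.List.pyGetD pair 1 0 - PySem.List.pyGetD pair 0 0))
    PySem.Set.empty
-- A's count of items in the window centered at k under cutoff c
def pvCnt (ilist : List Int) (c k : Int) : Int :=
  ((pvGs ilist).map (fun kg =>
    if (pvWin c k).1 ≤ kg.1 ∧ kg.1 ≤ (pvWin c k).2 then (kg.2.length : Int) else 0)).sum
-- B's count of items in the window centered at k under cutoff c (prefix sums + binary search)
def pvAmt (ilist : List Int) (c k : Int) : Int :=
  max (pvPsum (pvCounts ilist) (PySem.List.bisectRight (pvVals ilist) (k + c))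
     - pvPsum (pvCounts ilist) (PySem.List.bisectLeft (pvVals ilist) (pvWin c k).1)) 0
-- A's outer accumulation step
def pvMergeStep (acc : PySem.Dict Int Int) (kn : Int × Int) : PySem.Dict Int Int :=
  let acc1 := if acc.contains kn.1 then acc else acc.insert kn.1 0
  acc1.insert kn.1 (acc1.getD kn.1 0 + kn.2)
-- canonical forms of the two result dicts
def pvDictA (ilist : List Int) : PySem.Dict Int Int :=
  (pvCutoffs ilist).foldl (fun acc c =>
    ((pvGs ilist).map (fun kg => (kg.1, pvCnt ilist c kg.1))).foldl pvMergeStep acc)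
    PySem.Dict.empty
def pvDictB (ilist : List Int) : PySem.Dict Int Int :=
  (pvCutoffs ilist).foldl (fun acc c =>
    (pvVals ilist).foldl (fun acc k => acc.insert k (acc.getD k 0 + pvAmt ilist c k)) acc)
    PySem.Dict.empty
-- running partial sums (proof-side model of B's pre list)
def pvPartial : Int → List Int → List Int
  | _, [] => []
  | t, c :: cs => (t + c) :: pvPartial (t + c) cs

-- groupby structure
lemma pyGroupby_key_mem (s : List Int) : ∀ kg ∈ pyGroupby s, kg.1 ∈ s := by
  induction s with
  | nil => simp [pyGroupby]
  | cons x t ih =>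
    intro kg hkg
    rw [pyGroupby] at hkg
    cases hgt : pyGroupby t with
    | nil =>
      rw [hgt] at hkg
      simp only [List.mem_singleton] at hkg
      subst hkg
      exact List.mem_cons_self
    | cons p rest =>
      obtain ⟨k, g⟩ := p
      rw [hgt] at hkg
      dsimp only at hkg
      by_cases h : x = k
      · rw [if_pos h] at hkg
        rcases List.mem_cons.mp hkg with rfl | hmem
        · exact List.mem_cons_self
        · exact List.mem_cons_of_mem x (ih kg (hgt ▸ List.mem_cons_of_mem _ hmem))
      · rw [if_neg h] at hkg
        rcases List.mem_cons.mp hkg with rfl | hmem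
        · exact List.mem_cons_self
        · exact List.mem_cons_of_mem x (ih kg (hgt ▸ hmem))


lemma pyGroupby_keys_lt (s : List Int) (hs : s.Pairwise (· ≤ ·)) :
    ((pyGroupby s).map (·.1)).Pairwise (· < ·) := by
  induction s with
  | nil => simp [pyGroupby]
  | cons x t ih =>
    rw [List.pairwise_cons] at hs
    rw [pyGroupby]
    cases hgt : pyGroupby t with
    | nil => simp
    | cons p rest =>
      obtain ⟨k, g⟩ := p
      dsimp only
      have iht := ih hs.2
      rw [hgt] at iht
      simp only [List.map_cons] at iht
      have hkmem : k ∈ t := pyGroupby_key_mem t (k, g) (hgt ▸ List.mem_cons_self)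
      by_cases h : x = k
      · rw [if_pos h]
        simp only [List.map_cons, List.pairwise_cons] at iht ⊢
        refine ⟨?_, iht.2⟩
        intro y hy
        subst h
        exact iht.1 y hy
      · rw [if_neg h]
        simp only [List.map_cons, List.pairwise_cons] at iht ⊢
        have hxk : x < k := lt_of_le_of_ne (hs.1 k hkmem) h
        refine ⟨?_, iht.1, iht.2⟩
        intro y hy
        rcases List.mem_cons.mp hy with rfl | hy'
        · exact hxk
        · exact lt_trans hxk (iht.1 y hy')


lemma pvVals_lt (ilist : List Int) : (pvVals ilist).Pairwise (· < ·) := by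
  have := PySem.List.sorted_pairwise ilist (fun x => x)
  exact pyGroupby_keys_lt _ this


lemma pvVals_le (ilist : List Int) : (pvVals ilist).Pairwise (· ≤ ·) := by
  exact (pvVals_lt ilist).imp le_of_lt


lemma pvVals_nodup (ilist : List Int) : (pvVals ilist).Nodup := by
  exact (pvVals_lt ilist).imp ne_of_lt


-- generic sums
lemma sum_eq_sum_getD (l : List Int) : l.sum = ∑ i ∈ Finset.range l.length, l.getD i 0 := by
  induction l with
  | nil => simp
  | cons x t ih =>
    simp only [List.sum_cons, List.length_cons, ih, Finset.sum_range_succ']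
    simp [add_comm]


lemma pick_sum {α : Type} (l : List α) (key : α → Int) (w : Int → Int) (k : Int)
    (hnd : (l.map key).Nodup) (hk : k ∈ l.map key) :
    (l.map (fun a => if key a = k then w (key a) else 0)).sum = w k := by
  induction l with
  | nil => simp at hk
  | cons a t ih =>
    simp only [List.map_cons, List.sum_cons]
    rw [List.map_cons, List.nodup_cons] at hnd
    by_cases h : key a = k
    · rw [if_pos h]
      have hz : (t.map (fun x => if key x = k then w (key x) else 0)).sum = 0 := by
        apply List.sum_eq_zero
        intro x hx
        rw [List.mem_map] at hx
        obtain ⟨b, hb, rfl⟩ := hx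
        have hne : key b ≠ k := by
          intro hbk
          exact hnd.1 (hbk.trans h.symm ▸ List.mem_map_of_mem hb)
        rw [if_neg hne]
      rw [hz, h, add_zero]
    · rw [if_neg h, zero_add]
      apply ih hnd.2
      rw [List.map_cons] at hk
      rcases List.mem_cons.mp hk with rfl | hk'
      · exact absurd rfl h
      · exact hk'


-- dict basics
lemma dict_insert_insert {κ ν : Type} [BEq κ] [LawfulBEq κ] (d : PySem.Dict κ ν) (k : κ) (v v' : ν) :
    (d.insert k v).insert k v' = d.insert k v' := by
  apply PySem.Dict.ext
  rw [PySem.Dict.items_insert (d.insert k v), PySem.Dict.contains_insert_self, if_pos rfl]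
  rw [PySem.Dict.items_insert d k v, PySem.Dict.items_insert d k v']
  by_cases hc : d.contains k = true
  · rw [if_pos hc, if_pos hc, List.map_map]
    apply List.map_congr_left
    intro p _
    by_cases hpk : p.1 = k
    · simp [hpk]
    · simp [hpk]
  · rw [if_neg hc, if_neg hc, List.map_append]
    have h1 : List.map (fun p => if (p.1 == k) = true then (k, v') else p) d.items
        = List.map id d.items := by
      apply List.map_congr_left
      intro p hp
      have : p.1 ≠ k := by
        intro he
        exact hc ((PySem.Dict.contains_iff_mem_keys d k).mpr
          (he ▸ PySem.Dict.mem_keys_of_mem_items d hp))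
      simp [this]
    rw [h1, List.map_id]
    simp


-- A's inner window-counting loop only ever touches the key k4
lemma ncopy_inner (L : List (Int × List Int)) (d : PySem.Dict Int Int) (k4 : Int) (win : Int × Int) :
    ∀ v : Int,
    L.foldl (fun n4 kg =>
        if win.1 ≤ kg.1 ∧ kg.1 ≤ win.2 then n4.insert k4 (n4.getD k4 0 + (kg.2.length : Int))
        else n4) (d.insert k4 v)
    = d.insert k4 (v + (L.map (fun kg =>
        if win.1 ≤ kg.1 ∧ kg.1 ≤ win.2 then (kg.2.length : Int) else 0)).sum) := by
  induction L with
  | nil => intro v; simp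
  | cons kg t ih =>
    intro v
    simp only [List.foldl_cons, List.map_cons, List.sum_cons]
    by_cases hcond : win.1 ≤ kg.1 ∧ kg.1 ≤ win.2
    · rw [if_pos hcond, if_pos hcond, PySem.Dict.getD_insert_self, dict_insert_insert,
        ih (v + (kg.2.length : Int)), add_assoc]
    · rw [if_neg hcond, if_neg hcond, ih v, zero_add]


lemma ncopy_items (ilist : List Int) (c : Int) :
    (ncopyByCutoff ilist c).items = (pvGs ilist).map (fun kg => (kg.1, pvCnt ilist c kg.1)) := by
  simp only [ncopyByCutoff]
  rw [PySem.List.foldl_prod_mk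
      (f := fun (d : PySem.Dict Int (Int × Int)) (kg : Int × List Int) =>
        d.insert kg.1 (if kg.1 ≤ c then (1 : Int) else kg.1 - c, kg.1 + c))
      (g := fun (l : List (Int × List Int)) kg => l ++ [kg])]
  simp only [PySem.List.foldl_append_singleton_eq_self, List.nil_append]
  rw [PySem.Dict.items_foldl_insert_fresh (pyGroupby (PySem.List.sorted ilist (fun x => x) false))
      (fun kg => kg.1)
      (fun kg => (if kg.1 ≤ c then (1 : Int) else kg.1 - c, kg.1 + c))
      PySem.Dict.empty
      (fun a _ => PySem.Dict.contains_empty _)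
      (pvVals_nodup ilist)]
  have hemp : (PySem.Dict.empty : PySem.Dict Int (Int × Int)).items = [] := rfl
  rw [hemp, List.nil_append]
  have hstep := PySem.List.foldl_congr_mem
      (l := List.map (fun a => (a.1, if a.1 ≤ c then (1 : Int) else a.1 - c, a.1 + c))
        (pyGroupby (PySem.List.sorted ilist (fun x => x) false)))
      (init := (PySem.Dict.empty : PySem.Dict Int Int))
      (f := fun (n4 : PySem.Dict Int Int) (kw : Int × Int × Int) =>
        List.foldl (fun n4 kg =>
            if kw.2.1 ≤ kg.1 ∧ kg.1 ≤ kw.2.2 then n4.insert kw.1 (n4.getD kw.1 0 + (kg.2.length : Int))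
            else n4)
          (n4.insert kw.1 0) (pyGroupby (PySem.List.sorted ilist (fun x => x) false)))
      (g := fun (n4 : PySem.Dict Int Int) (kw : Int × Int × Int) =>
        n4.insert kw.1 ((0 : Int) +
          ((pyGroupby (PySem.List.sorted ilist (fun x => x) false)).map (fun kg =>
            if kw.2.1 ≤ kg.1 ∧ kg.1 ≤ kw.2.2 then (kg.2.length : Int) else 0)).sum))
      (fun n4 kw _ => ncopy_inner _ n4 kw.1 kw.2 0)
  rw [hstep]
  rw [PySem.Dict.items_foldl_insert_fresh
      (List.map (fun a => (a.1, if a.1 ≤ c then (1 : Int) else a.1 - c, a.1 + c))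
        (pyGroupby (PySem.List.sorted ilist (fun x => x) false)))
      (fun kw => kw.1)
      (fun kw => (0 : Int) +
        ((pyGroupby (PySem.List.sorted ilist (fun x => x) false)).map (fun kg =>
          if kw.2.1 ≤ kg.1 ∧ kg.1 ≤ kw.2.2 then (kg.2.length : Int) else 0)).sum)
      PySem.Dict.empty
      (fun a _ => PySem.Dict.contains_empty _)
      (by rw [List.map_map]; exact pvVals_nodup ilist)]
  have hemp2 : (PySem.Dict.empty : PySem.Dict Int Int).items = [] := rfl
  rw [hemp2, List.nil_append, List.map_map]
  apply List.map_congr_left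
  intro kg _
  rw [Function.comp_apply, zero_add]
  rfl


-- pre list characterization
lemma preFold (cs : List Int) : ∀ (p0 : List Int) (t : Int), p0.getLast? = some t →
    cs.foldl (fun p c => p ++ [PySem.List.pyGetD p (-1) 0 + c]) p0 = p0 ++ pvPartial t cs := by
  induction cs with
  | nil => intro p0 t h; simp [pvPartial]
  | cons c cs ih =>
    intro p0 t h
    have hne : p0 ≠ [] := by rintro rfl; simp at h
    have hlast : p0.getLast hne = t := by
      have h2 := List.getLast?_eq_some_getLast hne
      rw [h2] at h
      exact Option.some_inj.mp h
    rw [List.foldl_cons, PySem.List.pyGetD_neg_one p0 0 hne, hlast,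
      ih (p0 ++ [t + c]) (t + c) List.getLast?_concat, pvPartial,
      List.append_assoc, List.singleton_append]


lemma pvPartial_getD (cs : List Int) : ∀ (t : Int) (j : Nat), j < cs.length →
    (pvPartial t cs).getD j 0 = t + ∑ i ∈ Finset.range (j + 1), cs.getD i 0 := by
  induction cs with
  | nil => intro t j hj; simp at hj
  | cons c cs ih =>
    intro t j hj
    cases j with
    | zero => simp [pvPartial, ]
    | succ j =>
      show ((t + c) :: pvPartial (t + c) cs).getD (j + 1) 0 = _
      rw [List.getD_cons_succ, ih (t + c) j (by simpa using hj),
        Finset.sum_range_succ' (fun i => (c :: cs).getD i 0) (j + 1)]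
      simp only [List.getD_cons_succ, List.getD_cons_zero]
      ring


lemma pre_getD (cs : List Int) (m : Nat) (hm : m ≤ cs.length) :
    PySem.List.pyGetD (cs.foldl (fun p c => p ++ [PySem.List.pyGetD p (-1) 0 + c]) [0]) (m : Int) 0
    = pvPsum cs m := by
  rw [preFold cs [0] 0 rfl, PySem.List.pyGetD_natCast]
  cases m with
  | zero => simp [pvPsum]
  | succ j =>
    have hj : j < cs.length := by omega
    rw [show ([0] ++ pvPartial 0 cs : List Int) = 0 :: pvPartial 0 cs from rfl,
      List.getD_cons_succ, pvPartial_getD cs 0 j hj, pvPsum, zero_add]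


-- the core counting identity: scanning all runs = prefix sums + two binary searches
lemma counts_getD_nonneg (ilist : List Int) (i : Nat) : 0 ≤ (pvCounts ilist).getD i 0 := by
  by_cases hi : i < (pvCounts ilist).length
  · rw [List.getD_eq_getElem _ _ hi]
    have : (pvCounts ilist)[i] = (((pvGs ilist)[i]'(by simpa [pvCounts] using hi)).2.length : Int) := by
      simp [pvCounts]
    rw [this]
    exact Int.natCast_nonneg _
  · rw [List.getD_eq_default _ _ (le_of_not_gt hi)]


lemma core (ilist : List Int) (c k : Int) : pvCnt ilist c k = pvAmt ilist c k := by
  have hle := pvVals_le ilist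
  obtain ⟨hhi_le, hhi1, hhi2⟩ :=
    PySem.List.bisectRight_spec (pvVals ilist) ((pvWin c k).2) hle
  obtain ⟨hlo_le, hlo1, hlo2⟩ :=
    PySem.List.bisectLeft_spec (pvVals ilist) ((pvWin c k).1) hle
  set hi := PySem.List.bisectRight (pvVals ilist) ((pvWin c k).2) with hdefhi
  set lo := PySem.List.bisectLeft (pvVals ilist) ((pvWin c k).1) with hdeflo
  have hAmt : pvAmt ilist c k
      = max (pvPsum (pvCounts ilist) hi - pvPsum (pvCounts ilist) lo) 0 := rfl
  have hlenv : (pvVals ilist).length = (pvGs ilist).length := by simp [pvVals]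
  have hlenc : (pvCounts ilist).length = (pvGs ilist).length := by simp [pvCounts]
  -- LHS as a range sum over indices
  have hL : pvCnt ilist c k = ∑ i ∈ Finset.range (pvGs ilist).length,
      (if (pvWin c k).1 ≤ (pvVals ilist).getD i 0 ∧ (pvVals ilist).getD i 0 ≤ (pvWin c k).2
       then (pvCounts ilist).getD i 0 else 0) := by
    rw [pvCnt, sum_eq_sum_getD, List.length_map]
    apply Finset.sum_congr rfl
    intro i hir
    rw [Finset.mem_range] at hir
    rw [List.getD_eq_getElem _ _ (by simpa using hir), List.getElem_map]
    rw [List.getD_eq_getElem _ _ (by rw [hlenv]; exact hir),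
      List.getD_eq_getElem _ _ (by rw [hlenc]; exact hir)]
    simp only [pvVals, pvCounts, List.getElem_map]
  rw [hL, hAmt]
  -- index characterizations
  have hiff1 : ∀ i, i < (pvGs ilist).length →
      ((pvWin c k).1 ≤ (pvVals ilist).getD i 0 ↔ lo ≤ i) := by
    intro i hir
    have hiv : i < (pvVals ilist).length := by rw [hlenv]; exact hir
    rw [List.getD_eq_getElem _ _ hiv]
    constructor
    · intro hs
      by_contra hlt
      exact absurd (hlo1 i hiv (by omega)) (by omega)
    · intro hge
      exact hlo2 i hiv hge
  have hiff2 : ∀ i, i < (pvGs ilist).length →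
      ((pvVals ilist).getD i 0 ≤ (pvWin c k).2 ↔ i < hi) := by
    intro i hir
    have hiv : i < (pvVals ilist).length := by rw [hlenv]; exact hir
    rw [List.getD_eq_getElem _ _ hiv]
    constructor
    · intro hs
      by_contra hlt
      exact absurd (hhi2 i hiv (by omega)) (by omega)
    · intro hge
      exact hhi1 i hiv hge
  by_cases hcase : lo ≤ hi
  · have hsub : ∀ i ∈ Finset.range (pvGs ilist).length,
        (if (pvWin c k).1 ≤ (pvVals ilist).getD i 0 ∧ (pvVals ilist).getD i 0 ≤ (pvWin c k).2
         then (pvCounts ilist).getD i 0 else 0)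
        = (if i ∈ Finset.Ico lo hi then (pvCounts ilist).getD i 0 else 0) := by
      intro i hir
      rw [Finset.mem_range] at hir
      simp only [Finset.mem_Ico]
      by_cases hc1 : (pvWin c k).1 ≤ (pvVals ilist).getD i 0 ∧ (pvVals ilist).getD i 0 ≤ (pvWin c k).2
      · rw [if_pos hc1, if_pos ⟨(hiff1 i hir).mp hc1.1, (hiff2 i hir).mp hc1.2⟩]
      · rw [if_neg hc1, if_neg (fun hio =>
          hc1 ⟨(hiff1 i hir).mpr hio.1, (hiff2 i hir).mpr hio.2⟩)]
    rw [Finset.sum_congr rfl hsub, Finset.sum_ite_mem]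
    have hinter : Finset.range (pvGs ilist).length ∩ Finset.Ico lo hi = Finset.Ico lo hi := by
      apply Finset.inter_eq_right.mpr
      intro i hio
      rw [Finset.mem_Ico] at hio
      rw [Finset.mem_range]
      have : hi ≤ (pvGs ilist).length := by rw [← hlenv]; exact hhi_le
      omega
    rw [hinter, Finset.sum_Ico_eq_sub (fun i => (pvCounts ilist).getD i 0) hcase]
    have h0 : (0 : Int) ≤ pvPsum (pvCounts ilist) hi - pvPsum (pvCounts ilist) lo := by
      apply sub_nonneg.mpr
      apply Finset.sum_le_sum_of_subset_of_nonneg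
      · intro x hx
        rw [Finset.mem_range] at hx ⊢
        omega
      · intro i _ _
        exact counts_getD_nonneg ilist i
    rw [max_eq_left h0]
    rfl
  · have hz : ∀ i ∈ Finset.range (pvGs ilist).length,
        (if (pvWin c k).1 ≤ (pvVals ilist).getD i 0 ∧ (pvVals ilist).getD i 0 ≤ (pvWin c k).2
         then (pvCounts ilist).getD i 0 else 0) = 0 := by
      intro i hir
      rw [Finset.mem_range] at hir
      apply if_neg
      intro hc1
      have h1 := (hiff1 i hir).mp hc1.1
      have h2 := (hiff2 i hir).mp hc1.2
      omega
    rw [Finset.sum_congr rfl hz, Finset.sum_const_zero]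
    symm
    have hmono : pvPsum (pvCounts ilist) hi ≤ pvPsum (pvCounts ilist) lo :=
      Finset.sum_le_sum_of_subset_of_nonneg
        (by intro x hx; rw [Finset.mem_range] at hx ⊢; omega)
        (fun i _ _ => counts_getD_nonneg ilist i)
    rw [max_eq_right (by omega)]


lemma mergeStep_getD (acc : PySem.Dict Int Int) (p : Int × Int) (k : Int) :
    (pvMergeStep acc p).getD k 0 = if k = p.1 then acc.getD p.1 0 + p.2 else acc.getD k 0 := by
  unfold pvMergeStep
  by_cases hc : acc.contains p.1 = true
  · rw [if_pos hc, PySem.Dict.getD_insert]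
  · have hc' : acc.contains p.1 = false := by simpa using hc
    rw [if_neg hc, PySem.Dict.getD_insert]
    by_cases hk : k = p.1
    · rw [if_pos hk, if_pos hk, PySem.Dict.getD_insert_self,
        PySem.Dict.getD_of_not_contains acc 0 hc']
    · rw [if_neg hk, if_neg hk, PySem.Dict.getD_insert, if_neg hk]

lemma mergeStep_keys (acc : PySem.Dict Int Int) (p : Int × Int) :
    (pvMergeStep acc p).keys = PySem.Set.add acc.keys p.1 := by
  unfold pvMergeStep
  by_cases hc : acc.contains p.1 = true
  · rw [if_pos hc, PySem.Dict.keys_insert_of_contains acc _ hc,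
      PySem.Set.add_of_mem ((PySem.Dict.contains_iff_mem_keys acc p.1).mp hc)]
  · have hc' : acc.contains p.1 = false := by simpa using hc
    have hnm : p.1 ∉ acc.keys := fun hm => by
      rw [(PySem.Dict.contains_iff_mem_keys acc p.1).mpr hm] at hc'
      exact Bool.true_eq_false.mp hc' 
    rw [if_neg hc,
      PySem.Dict.keys_insert_of_contains _ _ (PySem.Dict.contains_insert_self acc p.1 0),
      PySem.Dict.keys_insert_of_not_contains acc _ hc',
      PySem.Set.add_of_not_mem hnm]

-- A's merge loop: effect on getD and keys
lemma mergeA_getD (L : List (Int × Int)) : ∀ (acc : PySem.Dict Int Int) (k : Int),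
    (L.foldl pvMergeStep acc).getD k 0
    = acc.getD k 0 + (L.map (fun p => if p.1 = k then p.2 else 0)).sum := by
  induction L with
  | nil => intro acc k; simp
  | cons p t ih =>
    intro acc k
    rw [List.foldl_cons, ih, mergeStep_getD, List.map_cons, List.sum_cons]
    by_cases hk : k = p.1
    · rw [if_pos hk, if_pos hk.symm]
      subst hk
      rw [add_assoc]
    · rw [if_neg hk, if_neg (fun h => hk h.symm), zero_add]


lemma mergeA_keys (L : List (Int × Int)) : ∀ (acc : PySem.Dict Int Int),
    (L.foldl pvMergeStep acc).keys = PySem.Set.update acc.keys (L.map (·.1)) := by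
  induction L with
  | nil => intro acc; rw [List.foldl_nil, List.map_nil, PySem.Set.update_nil]
  | cons p t ih =>
    intro acc
    rw [List.foldl_cons, ih, mergeStep_keys, List.map_cons, PySem.Set.update_cons]


-- B's accumulation loop: effect on getD
lemma insB_getD (vs : List Int) (w : Int → Int) : ∀ (acc : PySem.Dict Int Int) (k : Int),
    (vs.foldl (fun acc k => acc.insert k (acc.getD k 0 + w k)) acc).getD k 0
    = acc.getD k 0 + (vs.map (fun v => if v = k then w v else 0)).sum := by
  induction vs with
  | nil => intro acc k; simp
  | cons v t ih =>
    intro acc k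
    rw [List.foldl_cons, ih, PySem.Dict.getD_insert, List.map_cons, List.sum_cons]
    by_cases hk : k = v
    · rw [if_pos hk, if_pos hk.symm]
      subst hk
      rw [add_assoc]
    · rw [if_neg hk, if_neg (fun h => hk h.symm), zero_add]


-- folding over the cutoffs
lemma foldCL_A_getD (ilist : List Int) (CL : List Int) : ∀ (acc : PySem.Dict Int Int) (k : Int),
    (CL.foldl (fun acc c =>
      ((pvGs ilist).map (fun kg => (kg.1, pvCnt ilist c kg.1))).foldl pvMergeStep acc) acc).getD k 0
    = acc.getD k 0 + (CL.map (fun c =>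
        (((pvGs ilist).map (fun kg => (kg.1, pvCnt ilist c kg.1))).map
          (fun p => if p.1 = k then p.2 else 0)).sum)).sum := by
  induction CL with
  | nil => intro acc k; simp
  | cons c CL ih =>
    intro acc k
    rw [List.foldl_cons, ih, mergeA_getD, List.map_cons, List.sum_cons, add_assoc]


lemma foldCL_B_getD (ilist : List Int) (CL : List Int) : ∀ (acc : PySem.Dict Int Int) (k : Int),
    (CL.foldl (fun acc c =>
      (pvVals ilist).foldl (fun acc k => acc.insert k (acc.getD k 0 + pvAmt ilist c k)) acc) acc).getD k 0
    = acc.getD k 0 + (CL.map (fun c =>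
        ((pvVals ilist).map (fun v => if v = k then pvAmt ilist c v else 0)).sum)).sum := by
  induction CL with
  | nil => intro acc k; simp
  | cons c CL ih =>
    intro acc k
    rw [List.foldl_cons, ih, insB_getD, List.map_cons, List.sum_cons, add_assoc]


lemma set_update_self (s : PySem.Set Int) (xs : List Int) (h : ∀ x ∈ xs, x ∈ s) :
    PySem.Set.update s xs = s := by
  rw [PySem.Set.update_eq_append_filter]
  have hz : List.filter (fun y => !s.contains y) (PySem.Set.ofList xs) = [] := by
    rw [List.filter_eq_nil_iff]
    intro y hy
    have hys : y ∈ s := h y ((PySem.Set.mem_ofList xs y).mp hy)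
    simpa using hys
  rw [hz, List.append_nil]


lemma foldCL_A_keys (ilist : List Int) (CL : List Int) : ∀ (acc : PySem.Dict Int Int),
    (CL.foldl (fun acc c =>
      ((pvGs ilist).map (fun kg => (kg.1, pvCnt ilist c kg.1))).foldl pvMergeStep acc) acc).keys
    = CL.foldl (fun ks _ => PySem.Set.update ks (pvVals ilist)) acc.keys := by
  induction CL with
  | nil => intro acc; rfl
  | cons c CL ih =>
    intro acc
    rw [List.foldl_cons, ih, mergeA_keys, List.foldl_cons, List.map_map]
    rfl


lemma foldCL_B_keys (ilist : List Int) (CL : List Int) : ∀ (acc : PySem.Dict Int Int),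
    (CL.foldl (fun acc c =>
      (pvVals ilist).foldl (fun acc k => acc.insert k (acc.getD k 0 + pvAmt ilist c k)) acc) acc).keys
    = CL.foldl (fun ks _ => PySem.Set.update ks (pvVals ilist)) acc.keys := by
  induction CL with
  | nil => intro acc; rfl
  | cons c CL ih =>
    intro acc
    rw [List.foldl_cons, ih, List.foldl_cons,
      PySem.Dict.keys_foldl_insert_key (pvVals ilist) (fun x => x)
        (fun d x => d.getD x 0 + pvAmt ilist c x) acc,
      List.map_id']


lemma const_update (vals : List Int) (CL : List Int) :
    CL.foldl (fun ks _ => PySem.Set.update ks vals) vals = vals := by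
  induction CL with
  | nil => rfl
  | cons c CL ih =>
    rw [List.foldl_cons, set_update_self vals vals (fun x hx => hx)]
    exact ih


-- port normal forms
lemma A_norm (ilist : List Int) : getWindowKey4abundance ilist = (pvDictA ilist).items := by
  show ((pvCutoffs ilist).foldl (fun acc cutoff =>
      (ncopyByCutoff ilist cutoff).items.foldl pvMergeStep acc) PySem.Dict.empty).items
    = (pvDictA ilist).items
  unfold pvDictA
  congr 1
  apply PySem.List.foldl_congr_mem
  intro acc c _
  rw [ncopy_items]


def pvDictB0 (ilist : List Int) : PySem.Dict Int Int :=
  let s := PySem.List.sorted ilist (fun x => x) false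
  let vc := (pyGroupby s).foldl (fun (st : List Int × List Int) kg =>
      (st.1 ++ [kg.1], st.2 ++ [(kg.2.length : Int)])) ([], [])
  let vals := vc.1
  let counts := vc.2
  let pre := counts.foldl (fun p c => p ++ [PySem.List.pyGetD p (-1) 0 + c]) [0]
  (pvCutoffs ilist).foldl (fun acc cutoff =>
      vals.foldl (fun acc k =>
        let start := if k ≤ cutoff then (1 : Int) else k - cutoff
        let lo := PySem.List.bisectLeft vals start
        let hi := PySem.List.bisectRight vals (k + cutoff)
        acc.insert k (acc.getD k 0 +
          max (PySem.List.pyGetD pre (hi : Int) 0 - PySem.List.pyGetD pre (lo : Int) 0) 0)) acc)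
    PySem.Dict.empty

lemma B_norm (ilist : List Int) : getWindowKey4abundance_alt ilist = (pvDictB ilist).items := by
  have h0 : getWindowKey4abundance_alt ilist = (pvDictB0 ilist).items := rfl
  rw [h0]
  have hvc : (pyGroupby (PySem.List.sorted ilist (fun x => x) false)).foldl
      (fun (st : List Int × List Int) kg => (st.1 ++ [kg.1], st.2 ++ [(kg.2.length : Int)])) ([], [])
      = (pvVals ilist, pvCounts ilist) := by
    rw [PySem.List.foldl_prod_mk (f := fun (l : List Int) (kg : Int × List Int) => l ++ [kg.1])
        (g := fun (l : List Int) (kg : Int × List Int) => l ++ [(kg.2.length : Int)])]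
    rw [PySem.List.foldl_append_singleton_eq_map, PySem.List.foldl_append_singleton_eq_map]
    simp only [pvVals, pvCounts, pvGs, pvS, Prod.mk.injEq]
    constructor <;> rfl
  simp only [pvDictB0, hvc]
  unfold pvDictB
  congr 1
  apply PySem.List.foldl_congr_mem
  intro acc c _
  apply PySem.List.foldl_congr_mem
  intro acc2 k _
  have hle := pvVals_le ilist
  have hlen : (pvVals ilist).length = (pvCounts ilist).length := by simp [pvVals, pvCounts]
  have hhi : PySem.List.bisectRight (pvVals ilist) (k + c) ≤ (pvCounts ilist).length :=
    hlen ▸ (PySem.List.bisectRight_spec (pvVals ilist) (k + c) hle).1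
  have hlo : PySem.List.bisectLeft (pvVals ilist) (if k ≤ c then (1 : Int) else k - c)
      ≤ (pvCounts ilist).length :=
    hlen ▸ (PySem.List.bisectLeft_spec (pvVals ilist) _ hle).1
  rw [pre_getD _ _ hhi, pre_getD _ _ hlo]
  rfl


lemma AB (ilist : List Int) : (pvDictA ilist).items = (pvDictB ilist).items := by
  have hnd := pvVals_nodup ilist
  rcases hCL : pvCutoffs ilist with _ | ⟨c0, CL'⟩
  · unfold pvDictA pvDictB
    rw [hCL]
    rfl
  · have hemp : (PySem.Dict.empty : PySem.Dict Int Int).keys = [] := rfl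
    have hkA : (pvDictA ilist).keys = pvVals ilist := by
      unfold pvDictA
      rw [hCL, foldCL_A_keys ilist (c0 :: CL') PySem.Dict.empty, List.foldl_cons, hemp,
        PySem.Set.update_nil_left, PySem.Set.ofList_eq_self_of_nodup _ hnd]
      exact const_update (pvVals ilist) CL'
    have hkB : (pvDictB ilist).keys = pvVals ilist := by
      unfold pvDictB
      rw [hCL, foldCL_B_keys ilist (c0 :: CL') PySem.Dict.empty, List.foldl_cons, hemp,
        PySem.Set.update_nil_left, PySem.Set.ofList_eq_self_of_nodup _ hnd]
      exact const_update (pvVals ilist) CL'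
    have hgd : ∀ k, k ∈ pvVals ilist → (pvDictA ilist).getD k 0 = (pvDictB ilist).getD k 0 := by
      intro k hk
      unfold pvDictA pvDictB
      rw [foldCL_A_getD, foldCL_B_getD]
      have hcong : ∀ c ∈ pvCutoffs ilist,
          (((pvGs ilist).map (fun kg => (kg.1, pvCnt ilist c kg.1))).map
            (fun p => if p.1 = k then p.2 else 0)).sum
          = ((pvVals ilist).map (fun v => if v = k then pvAmt ilist c v else 0)).sum := by
        intro c _
        have e1 : (((pvGs ilist).map (fun kg => (kg.1, pvCnt ilist c kg.1))).map
            (fun p => if p.1 = k then p.2 else 0)).sum = pvCnt ilist c k := by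
          rw [List.map_map]
          exact pick_sum (pvGs ilist) (fun kg => kg.1) (pvCnt ilist c) k hnd hk
        have e2 : ((pvVals ilist).map (fun v => if v = k then pvAmt ilist c v else 0)).sum
            = pvAmt ilist c k := by
          have hnd' : ((pvVals ilist).map (fun v => v)).Nodup := by
            rw [List.map_id']
            exact hnd
          have hk' : k ∈ (pvVals ilist).map (fun v => v) := by
            rw [List.map_id']
            exact hk
          exact pick_sum (pvVals ilist) (fun v => v) (pvAmt ilist c) k hnd' hk'
        rw [e1, e2, core]
      rw [List.map_congr_left hcong]
    have hndA : (pvDictA ilist).keys.Nodup := by rw [hkA]; exact hnd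
    have hndB : (pvDictB ilist).keys.Nodup := by rw [hkB]; exact hnd
    rw [PySem.Dict.items_eq_map_keys (pvDictA ilist) hndA 0,
        PySem.Dict.items_eq_map_keys (pvDictB ilist) hndB 0, hkA, hkB]
    apply List.map_congr_left
    intro k hk
    rw [hgd k hk]


-- ===== VERDICT (by name: the statement is the Claim_ definition above) =====
theorem getWindowKey4abundance_spec : Claim_equal_getWindowKey4abundance := by
  intro ilist _
  unfold Spec_getWindowKey4abundance
  rw [A_norm, B_norm, AB]
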